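-- pv_equiv track=rewrite | github.com/boldsoftware/exe.dev | .buildkite/steps/generate-pipeline.py | split_migration_tests
-- ===== SOURCE A (Python) =====
-- MIGRATION_TEST_COSTS = [
--     ("TestDirectMigrationCold", 31),
--     ("TestDirectMigrationLive", 51),
--     ("TestDirectMigrationOperatorSSHCold", 32),
--     ("TestDirectMigrationOperatorSSHLive", 55),
--     ("TestDirectMigrationOrphanedDataset", 30),
--     ("TestDirectMigrationReconnect", 25),
--     ("TestDirectMigrationResumable", 34),
--     ("TestDirectMigrationResumablePhase2", 24),
-- ]
--
-- def split_migration_tests(n_shards):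
--     """Split MIGRATION_TEST_COSTS into n_shards balanced groups.
--
--     Uses longest-processing-time-first greedy partitioning: assign each
--     test (in decreasing cost order) to the currently-lightest shard.
--     Produces an (up to 4/3)-approximation of the optimal makespan, which
--     is plenty for 5 items and 2 shards.
--
--     Returns a list of lists of test names.
--     """
--     tests = sorted(MIGRATION_TEST_COSTS, key=lambda t: -t[1])
--     shards = [[] for _ in range(n_shards)]
--     loads = [0] * n_shards
--     for name, cost in tests:
--         i = loads.index(min(loads))
--         shards[i].append(name)
--         loads[i] += cost
--     return shards
-- ===== SOURCE B (Python) =====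
-- MIGRATION_TEST_COSTS = [
--     ("TestDirectMigrationCold", 31),
--     ("TestDirectMigrationLive", 51),
--     ("TestDirectMigrationOperatorSSHCold", 32),
--     ("TestDirectMigrationOperatorSSHLive", 55),
--     ("TestDirectMigrationOrphanedDataset", 30),
--     ("TestDirectMigrationReconnect", 25),
--     ("TestDirectMigrationResumable", 34),
--     ("TestDirectMigrationResumablePhase2", 24),
-- ]
--
--
-- def _insert_sorted(queue, entry):
--     """Insert entry into an ascending-sorted list, keeping it sorted."""
--     pos = 0
--     while pos < len(queue) and queue[pos] <= entry:
--         pos += 1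
--     return queue[:pos] + [entry] + queue[pos:]
--
--
-- def split_migration_tests(n_shards):
--     """Split MIGRATION_TEST_COSTS into n_shards balanced groups (LPT greedy).
--
--     Keeps a priority queue of (load, shard_index) pairs as an
--     ascending-sorted list: the head is always the lightest shard
--     (lowest index on ties), so no per-step scan over all shards is needed.
--     """
--     tests = sorted(MIGRATION_TEST_COSTS, key=lambda t: -t[1])
--     shards = [[] for _ in range(n_shards)]
--     queue = [(0, i) for i in range(n_shards)]
--     for name, cost in tests:
--         load, i = queue[0]
--         queue = _insert_sorted(queue[1:], (load + cost, i))
--         shards[i] = shards[i] + [name]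
--     return shards
-- ===== Notes on version B (the rewrite author's own statement) =====
-- stated objective: alternative
-- what changed: Replaces A's per-test argmin scan over a loads array (min + list.index) by a priority queue kept as an ascending-sorted list of (load, shard_index) pairs: each test pops the head (lightest shard, lowest index on ties) and reinserts the updated pair in order.
-- outside the precondition, e.g. on split_migration_tests(0): A raises ValueError, B raises IndexError
import Mathlib
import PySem

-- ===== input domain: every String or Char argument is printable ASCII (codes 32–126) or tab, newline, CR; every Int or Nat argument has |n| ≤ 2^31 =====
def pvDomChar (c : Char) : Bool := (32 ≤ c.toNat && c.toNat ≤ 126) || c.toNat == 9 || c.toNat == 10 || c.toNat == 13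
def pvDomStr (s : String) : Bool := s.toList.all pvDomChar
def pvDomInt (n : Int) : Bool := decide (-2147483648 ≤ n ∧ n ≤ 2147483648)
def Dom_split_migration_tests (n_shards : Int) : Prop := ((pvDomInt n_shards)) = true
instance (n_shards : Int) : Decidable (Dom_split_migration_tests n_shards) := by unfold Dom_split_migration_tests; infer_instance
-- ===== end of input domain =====

-- B replaces A's per-test argmin scan over the loads list by a priority queue kept as an
-- ascending-sorted list of (load, shard_index) pairs (alternative data structure, same results).

def MIGRATION_TEST_COSTS : List (String × Int) := [
  ("TestDirectMigrationCold", 31),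
  ("TestDirectMigrationLive", 51),
  ("TestDirectMigrationOperatorSSHCold", 32),
  ("TestDirectMigrationOperatorSSHLive", 55),
  ("TestDirectMigrationOrphanedDataset", 30),
  ("TestDirectMigrationReconnect", 25),
  ("TestDirectMigrationResumable", 34),
  ("TestDirectMigrationResumablePhase2", 24)]

-- ===== PORT A =====
-- loop body of A: i = loads.index(min(loads)); shards[i].append(name); loads[i] += cost
def stepA (st : List (List String) × List Int) (t : String × Int) :
    List (List String) × List Int :=
  match PySem.List.min? st.2 (fun x => x) with
  | none => st      -- Python: min([]) raises ValueError; excluded by Pre_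
  | some m =>
    match PySem.List.index? st.2 m with
    | none => st    -- unreachable: the minimum is a member of loads
    | some i =>
      (st.1.set i (st.1.getD i [] ++ [t.1]), st.2.set i (st.2.getD i 0 + t.2))

def split_migration_tests (n_shards : Int) : List (List String) :=
  let tests := PySem.List.sorted MIGRATION_TEST_COSTS (fun t => -t.2)
  let shards : List (List String) := (PySem.List.pyRange 0 n_shards).map (fun _ => [])
  let loads : List Int := List.replicate n_shards.toNat 0   -- [0] * n_shards
  (tests.foldl stepA (shards, loads)).1

-- ===== PORT B =====
-- Python tuple comparison (load, i) <= (load', i'): lexicographic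
def pairLe (a b : Int × Int) : Bool :=
  decide (a.1 < b.1) || (a.1 == b.1 && decide (a.2 ≤ b.2))

-- the scan for the insertion position: pos = 0; while pos < len(queue) and queue[pos] <= entry: pos += 1
def insPosB (queue : List (Int × Int)) (entry : Int × Int) : Nat :=
  match queue with
  | [] => 0
  | q :: rest => if pairLe q entry then insPosB rest entry + 1 else 0

-- queue[:pos] + [entry] + queue[pos:]
def insertSortedB (queue : List (Int × Int)) (entry : Int × Int) : List (Int × Int) :=
  queue.take (insPosB queue entry) ++ [entry] ++ queue.drop (insPosB queue entry)

-- loop body of B: load, i = queue[0]; queue = _insert_sorted(queue[1:], (load+cost, i)); shards[i] += [name]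
def stepB (st : List (List String) × List (Int × Int)) (t : String × Int) :
    List (List String) × List (Int × Int) :=
  match st.2 with
  | [] => st        -- Python: queue[0] on an empty queue raises IndexError; excluded by Pre_
  | (load, i) :: rest =>
      -- i is always a shard index with 0 ≤ i < len(shards), so set/getD at i.toNat is exact here
      (st.1.set i.toNat (st.1.getD i.toNat [] ++ [t.1]), insertSortedB rest (load + t.2, i))

def split_migration_tests_alt (n_shards : Int) : List (List String) :=
  let tests := PySem.List.sorted MIGRATION_TEST_COSTS (fun t => -t.2)
  let shards : List (List String) := (PySem.List.pyRange 0 n_shards).map (fun _ => [])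
  let queue : List (Int × Int) := (PySem.List.pyRange 0 n_shards).map (fun i => ((0 : Int), i))
  (tests.foldl stepB (shards, queue)).1

-- ===== PRECONDITION & SPEC =====
-- Pre_ excludes n_shards ≤ 0, where A raises ValueError (min of an empty list) and B raises IndexError.
def Pre_split_migration_tests (n_shards : Int) : Prop := 1 ≤ n_shards
instance (n_shards : Int) : Decidable (Pre_split_migration_tests n_shards) := by
  unfold Pre_split_migration_tests; infer_instance
def pvWitness_split_migration_tests : Int := (2)

def Spec_split_migration_tests (n_shards : Int) (out : List (List String)) : Prop := out = split_migration_tests_alt n_shards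
instance (n_shards : Int) (out : List (List String)) : Decidable (Spec_split_migration_tests n_shards out) := by unfold Spec_split_migration_tests; infer_instance

-- ===== CLAIM (what is proved, stated in full; the proofs are below) =====
def Claim_equal_split_migration_tests : Prop := ∀ (n_shards : Int), Dom_split_migration_tests n_shards → Pre_split_migration_tests n_shards → Spec_split_migration_tests n_shards (split_migration_tests n_shards)

-- ===== LEMMAS AND PROOFS =====

-- the zero-load tail of B's queue: entries (0, j), (0, j+1), …, (0, j+c-1)
def ztail : Nat → Nat → List (Int × Int)
  | _, 0 => []
  | j, c + 1 => ((0 : Int), (j : Int)) :: ztail (j + 1) c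

theorem ztail_succ (j c : Nat) : ztail j (c + 1) = ((0 : Int), (j : Int)) :: ztail (j + 1) c := rfl

theorem ztail_length (c : Nat) : ∀ j, (ztail j c).length = c := by
  induction c with
  | zero => intro j; rfl
  | succ c ih => intro j; rw [ztail_succ, List.length_cons, ih]

theorem insPosB_zeros (c : Nat) (S : List (Int × Int)) (e : Int × Int) (he : 0 < e.1) :
    ∀ j, insPosB (ztail j c ++ S) e = c + insPosB S e := by
  induction c with
  | zero => intro j; simp [ztail]
  | succ c ih =>
    intro j
    rw [ztail_succ, List.cons_append]
    have hle : pairLe (0, (j : Int)) e = true := by simp [pairLe]; omega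
    simp only [insPosB, hle, if_pos, ih]
    omega

theorem insertSortedB_zeros (c : Nat) (j : Nat) (S : List (Int × Int)) (e : Int × Int)
    (he : 0 < e.1) :
    insertSortedB (ztail j c ++ S) e = ztail j c ++ insertSortedB S e := by
  unfold insertSortedB
  rw [insPosB_zeros c S e he j,
    show c + insPosB S e = (ztail j c).length + insPosB S e by rw [ztail_length],
    List.take_length_add_append, List.drop_length_add_append]
  simp

theorem stepA_eq (shpref : List (List String)) (pref : List Int) (c : Nat)
    (hlen : shpref.length = pref.length) (hpos : ∀ x ∈ pref, 0 < x)
    (name : String) (cost : Int) :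
    stepA (shpref ++ List.replicate (c + 1) [], pref ++ List.replicate (c + 1) 0) (name, cost)
      = ((shpref ++ [[name]]) ++ List.replicate c [], (pref ++ [cost]) ++ List.replicate c 0) := by
  have hmin : PySem.List.min? (pref ++ List.replicate (c + 1) (0 : Int)) (fun x => x)
      = some 0 := by
    cases h : PySem.List.min? (pref ++ List.replicate (c + 1) (0 : Int)) (fun x => x) with
    | none =>
      rw [PySem.List.min?_eq_none_iff] at h
      exact absurd h (by simp [List.replicate_succ])
    | some m =>
      have hm := PySem.List.min?_mem h
      have hle := PySem.List.min?_isMin h 0 (by simp [List.replicate_succ])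
      have : 0 ≤ m := by
        rcases List.mem_append.1 hm with h1 | h1
        · exact le_of_lt (hpos m h1)
        · have := List.eq_of_mem_replicate h1; omega
      simp only at hle
      congr 1
      omega
  have hidx : PySem.List.index? (pref ++ List.replicate (c + 1) (0 : Int)) 0
      = some pref.length := by
    rw [PySem.List.index?_eq_some_iff]
    exact ⟨pref, List.replicate c 0, by simp [List.replicate_succ], rfl,
      fun hmem => absurd (hpos 0 hmem) (by norm_num)⟩
  simp only [stepA, hmin, hidx]
  simp only [List.replicate_succ, Prod.mk.injEq]
  refine ⟨?_, ?_⟩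
  · rw [← hlen, List.set_append_right _ _ (le_refl _), List.getD_append_right _ _ _ _ (le_refl _)]
    simp
  · rw [List.set_append_right _ _ (le_refl _), List.getD_append_right _ _ _ _ (le_refl _)]
    simp

theorem stepB_eq (shpref : List (List String)) (c : Nat) (S : List (Int × Int))
    (name : String) (cost : Int) (hc : 0 < cost) :
    stepB (shpref ++ List.replicate (c + 1) [], ztail shpref.length (c + 1) ++ S) (name, cost)
      = ((shpref ++ [[name]]) ++ List.replicate c [],
         ztail (shpref.length + 1) c ++ insertSortedB S (cost, (shpref.length : Int))) := by
  rw [ztail_succ, List.cons_append]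
  simp only [stepB, Int.toNat_natCast, Prod.mk.injEq]
  refine ⟨?_, ?_⟩
  · rw [List.replicate_succ, List.set_append_right _ _ (le_refl _),
      List.getD_append_right _ _ _ _ (le_refl _)]
    simp
  · rw [insertSortedB_zeros c _ S (0 + cost, (shpref.length : Int)) (by simpa using hc)]
    norm_num

theorem foldA_eq (ts : List (String × Int)) (hpos : ∀ t ∈ ts, 0 < t.2) :
    ∀ (shpref : List (List String)) (pref : List Int) (c : Nat),
      shpref.length = pref.length → (∀ x ∈ pref, 0 < x) → ts.length ≤ c →
      (List.foldl stepA (shpref ++ List.replicate c [], pref ++ List.replicate c 0) ts).1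
        = (shpref ++ ts.map (fun t => [t.1])) ++ List.replicate (c - ts.length) [] := by
  induction ts with
  | nil => intro shpref pref c _ _ _; simp
  | cons t ts ih =>
    intro shpref pref c hlen hppos hc
    obtain ⟨c', rfl⟩ : ∃ c', c = c' + 1 := ⟨c - 1, by simp at hc; omega⟩
    rw [List.foldl_cons]
    have ht : 0 < t.2 := hpos t (by simp)
    rw [show (t : String × Int) = (t.1, t.2) from rfl,
      stepA_eq shpref pref c' hlen hppos t.1 t.2]
    have hppos' : ∀ x ∈ pref ++ [t.2], 0 < x := by
      intro x hx
      rcases List.mem_append.1 hx with h1 | h1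
      · exact hppos x h1
      · simp at h1; omega
    have hlen' : (shpref ++ [[t.1]]).length = (pref ++ [t.2]).length := by simp [hlen]
    have hc' : ts.length ≤ c' := by simp at hc; omega
    rw [ih (fun u hu => hpos u (List.mem_cons_of_mem _ hu)) _ _ c' hlen' hppos' hc']
    simp [Nat.add_sub_add_right]

theorem foldB_eq (ts : List (String × Int)) (hpos : ∀ t ∈ ts, 0 < t.2) :
    ∀ (shpref : List (List String)) (c : Nat) (S : List (Int × Int)),
      ts.length ≤ c →
      (List.foldl stepB (shpref ++ List.replicate c [], ztail shpref.length c ++ S) ts).1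
        = (shpref ++ ts.map (fun t => [t.1])) ++ List.replicate (c - ts.length) [] := by
  induction ts with
  | nil => intro shpref c S _; simp
  | cons t ts ih =>
    intro shpref c S hc
    obtain ⟨c', rfl⟩ : ∃ c', c = c' + 1 := ⟨c - 1, by simp at hc; omega⟩
    rw [List.foldl_cons]
    have ht : 0 < t.2 := hpos t (by simp)
    rw [show (t : String × Int) = (t.1, t.2) from rfl,
      stepB_eq shpref c' S t.1 t.2 ht]
    have hlen : (shpref ++ [[t.1]]).length = shpref.length + 1 := by simp
    have hc' : ts.length ≤ c' := by simp at hc; omega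
    rw [← hlen, ih (fun u hu => hpos u (List.mem_cons_of_mem _ hu)) _ c' _ hc']
    simp [Nat.add_sub_add_right]

theorem chain_eq (m : Nat) :
    split_migration_tests ((m + 8 : Nat) : Int) = split_migration_tests_alt ((m + 8 : Nat) : Int) := by
  have hpos : ∀ t ∈ PySem.List.sorted MIGRATION_TEST_COSTS (fun t => -t.2), 0 < t.2 := by
    intro t ht
    rw [PySem.List.mem_sorted] at ht
    have : ∀ t ∈ MIGRATION_TEST_COSTS, 0 < t.2 := by decide
    exact this t ht
  have hlen : (PySem.List.sorted MIGRATION_TEST_COSTS (fun t : String × Int => -t.2)).length = 8 := by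
    rw [PySem.List.length_sorted]; rfl
  have hsh : ((PySem.List.pyRange 0 ((m + 8 : Nat) : Int)).map (fun _ => ([] : List String)))
      = List.replicate (m + 8) [] := by
    rw [PySem.List.pyRange_zero_nat, List.map_map]
    simp [Function.comp_def, List.map_const']
  have hq : ((PySem.List.pyRange 0 ((m + 8 : Nat) : Int)).map (fun i => ((0 : Int), i)))
      = ztail 0 (m + 8) := by
    have hz : ∀ (c j : Nat), ((List.range' j c).map (fun i : Nat => ((0 : Int), (i : Int)))) = ztail j c := by
      intro c
      induction c with
      | zero => intro j; rfl
      | succ c ih => intro j; rw [List.range'_succ, List.map_cons, ih, ztail_succ]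
    rw [PySem.List.pyRange_zero_nat, List.map_map]
    simp only [Function.comp_def, List.range_eq_range']
    exact hz _ _
  simp only [split_migration_tests, split_migration_tests_alt, hsh, hq, Int.toNat_natCast]
  have hA := foldA_eq _ hpos [] [] (m + 8) rfl (by simp) (by rw [hlen]; omega)
  have hB := foldB_eq _ hpos [] (m + 8) [] (by rw [hlen]; omega)
  simp only [List.nil_append, List.append_nil, List.length_nil] at hA hB
  rw [hA, hB]

-- ===== VERDICT (by name: the statement is the Claim_ definition above) =====
theorem split_migration_tests_spec : Claim_equal_split_migration_tests := by
  unfold Claim_equal_split_migration_tests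
  intro n hdom hpre
  unfold Spec_split_migration_tests
  unfold Pre_split_migration_tests at hpre
  obtain ⟨N, rfl⟩ : ∃ N : Nat, n = (N : Int) :=
    ⟨n.toNat, (Int.toNat_of_nonneg (by omega)).symm⟩
  have hN : 1 ≤ N := by exact_mod_cast hpre
  by_cases h8 : N < 8
  · interval_cases N <;> decide
  · obtain ⟨m, rfl⟩ : ∃ m, N = m + 8 := ⟨N - 8, by omega⟩
    exact chain_eq m
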